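-- pv_equiv track=rewrite | github.com/AbigaelKirwa/Assessment-I | longest_consecutive_sequence.py | find_longest_sequence
-- ===== SOURCE A (Python) =====
-- def find_longest_sequence(arr):
--     # creating an empty list
--     sequence_list = []
--     # getting the minimum value
--     min_value = min(arr)
--     # enter the least value in sequence list
--     sequence_list.append(min_value)
--     # loop through the array as long as the maximum value + 1 exists in the array
--     while max(sequence_list) + 1 in arr:
--         # iterating through the array
--         for i in arr:
--             # check if i is equal to the maximum value in sequence list plus one
--             if i == max(sequence_list) + 1:
--                 # if conidtion is true add i to the sequence list
--                 sequence_list.append(i)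
--     return sequence_list
-- ===== SOURCE B (Python) =====
-- def find_longest_sequence(arr):
--     # hash-set membership, walk consecutive values upward from the minimum
--     s = set(arr)
--     m = min(arr)
--     seq = [m]
--     while seq[-1] + 1 in s:
--         seq.append(seq[-1] + 1)
--     return seq
-- ===== Notes on version B (the rewrite author's own statement) =====
-- stated objective: alternative
-- what changed: Replaces A's restarted while-loop with nested scans and per-element max() recomputation by a hash-set plus a direct walk that appends last+1 while it is a member; removes all inner scans, trading them for one set construction.
import Mathlib
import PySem

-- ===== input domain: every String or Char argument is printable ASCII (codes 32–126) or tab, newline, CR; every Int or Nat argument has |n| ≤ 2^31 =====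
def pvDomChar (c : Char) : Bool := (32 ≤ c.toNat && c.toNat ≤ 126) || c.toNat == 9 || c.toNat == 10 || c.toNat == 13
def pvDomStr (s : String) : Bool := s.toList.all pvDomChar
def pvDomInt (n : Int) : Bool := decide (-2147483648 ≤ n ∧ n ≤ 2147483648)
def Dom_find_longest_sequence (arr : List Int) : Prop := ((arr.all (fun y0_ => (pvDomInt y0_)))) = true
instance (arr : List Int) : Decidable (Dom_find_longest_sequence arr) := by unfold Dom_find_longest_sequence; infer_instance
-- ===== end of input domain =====

-- B replaces A's restarted rescans (with max() recomputed per element) by a set and a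
-- single walk appending last+1 while present (alternative algorithm, no inner scans).

-- ===== PORT A =====
-- one 'for i in arr' pass of A's while-body, state = sequence_list
def pvPassA (arr seq : List Int) : List Int :=
  arr.foldl (fun s i => if i = ((PySem.List.max? s (fun x => x)).getD 0) + 1 then s ++ [i] else s) seq

-- A's while loop; fuel = arr.length only makes the recursion total: each iteration
-- appends at least one fresh value of arr, so at most arr.length iterations run (proved below).
def pvWhileA (fuel : Nat) (arr seq : List Int) : List Int :=
  match fuel with
  | 0 => seq
  | f + 1 =>
      if ((PySem.List.max? seq (fun x => x)).getD 0) + 1 ∈ arr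
      then pvWhileA f arr (pvPassA arr seq)
      else seq

def find_longest_sequence (arr : List Int) : List Int :=
  match PySem.List.min? arr (fun x => x) with
  | none => []   -- min([]) raises ValueError; excluded by Pre_
  | some m => pvWhileA arr.length arr [m]

-- ===== PORT B =====
-- B's while loop; fuel = arr.length only makes the recursion total (same bound as A's loop).
def pvExtendB (fuel : Nat) (s : PySem.Set Int) (seq : List Int) : List Int :=
  match fuel with
  | 0 => seq
  | f + 1 =>
      let lastv := (seq.getLast?).getD 0   -- seq[-1]; seq is never empty
      if PySem.Set.contains s (lastv + 1)
      then pvExtendB f s (seq ++ [lastv + 1])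
      else seq

def find_longest_sequence_alt (arr : List Int) : List Int :=
  let s := PySem.Set.ofList arr
  match PySem.List.min? arr (fun x => x) with
  | none => []   -- min([]) raises ValueError; excluded by Pre_
  | some m => pvExtendB arr.length s [m]

-- ===== PRECONDITION & SPEC =====
-- Python A raises ValueError (min of empty sequence) on []; B raises there too.
def Pre_find_longest_sequence (arr : List Int) : Prop := arr ≠ []
instance (arr : List Int) : Decidable (Pre_find_longest_sequence arr) := by
  unfold Pre_find_longest_sequence; infer_instance

def pvWitness_find_longest_sequence : List Int := ([3, 1, 2, 5, 2])

def Spec_find_longest_sequence (arr : List Int) (out : List Int) : Prop := out = find_longest_sequence_alt arr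
instance (arr : List Int) (out : List Int) : Decidable (Spec_find_longest_sequence arr out) := by unfold Spec_find_longest_sequence; infer_instance

-- ===== CLAIM (what is proved, stated in full; the proofs are below) =====
def Claim_equal_find_longest_sequence : Prop := ∀ (arr : List Int), Dom_find_longest_sequence arr → Pre_find_longest_sequence arr → Spec_find_longest_sequence arr (find_longest_sequence arr)

-- ===== LEMMAS AND PROOFS =====

-- the run m, m+1, …, m+c
def pvRun (m : Int) (c : Nat) : List Int := (List.range (c + 1)).map (fun (j : Nat) => m + (j : Int))

-- counter abstraction of one pvPassA pass
def pvCnt (m : Int) : List Int → Nat → Nat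
  | [], c => c
  | i :: t, c => pvCnt m t (if i = m + c + 1 then c + 1 else c)

-- counter abstraction of A's while loop
def pvAcnt (m : Int) (arr : List Int) : Nat → Nat → Nat
  | 0, c => c
  | f + 1, c => if m + c + 1 ∈ arr then pvAcnt m arr f (pvCnt m arr c) else c

-- counter abstraction of B's while loop
def pvBcnt (m : Int) (arr : List Int) : Nat → Nat → Nat
  | 0, c => c
  | f + 1, c => if m + c + 1 ∈ arr then pvBcnt m arr f (c + 1) else c

-- invariant: every value of the run so far occurs in arr
def pvInv (arr : List Int) (m : Int) (c : Nat) : Prop := ∀ j : Nat, j ≤ c → m + (j : Int) ∈ arr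

theorem pvRun_zero (m : Int) : pvRun m 0 = [m] := by simp [pvRun]

theorem pvRun_succ (m : Int) (c : Nat) : pvRun m (c + 1) = pvRun m c ++ [m + (c + 1 : Nat)] := by
  simp [pvRun, List.range_succ]

theorem pvMem_run (m : Int) (c : Nat) (x : Int) : x ∈ pvRun m c ↔ m ≤ x ∧ x ≤ m + c := by
  constructor
  · intro hx
    simp only [pvRun, List.mem_map] at hx
    obtain ⟨j, hj, rfl⟩ := hx
    rw [List.mem_range] at hj
    omega
  · rintro ⟨h1, h2⟩
    simp only [pvRun, List.mem_map]
    exact ⟨(x - m).toNat, List.mem_range.2 (by omega), by omega⟩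

theorem pvMax_run (m : Int) (c : Nat) : PySem.List.max? (pvRun m c) (fun x => x) = some (m + c) := by
  rcases h : PySem.List.max? (pvRun m c) (fun x => x) with _ | v
  · rw [PySem.List.max?_eq_none_iff] at h
    have : m ∈ pvRun m c := (pvMem_run m c m).2 ⟨le_refl _, by omega⟩
    simp [h] at this
  · have hmem := PySem.List.max?_mem h
    have hmax := PySem.List.max?_isMax h (m + c) ((pvMem_run m c _).2 ⟨by omega, le_refl _⟩)
    have := (pvMem_run m c v).1 hmem
    simp only at hmax
    congr 1; omega

theorem pvLast_run (m : Int) (c : Nat) : (pvRun m c).getLast? = some (m + c) := by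
  induction c with
  | zero => simp [pvRun_zero]
  | succ c _ => rw [pvRun_succ, List.getLast?_append]; simp

theorem pvPass_run (m : Int) (l : List Int) :
    ∀ c, pvPassA l (pvRun m c) = pvRun m (pvCnt m l c) := by
  induction l with
  | nil => intro c; simp [pvPassA, pvCnt]
  | cons i t ih =>
      intro c
      simp only [pvPassA, List.foldl_cons, pvCnt, pvMax_run, Option.getD_some]
      by_cases h : i = m + c + 1
      · simp only [if_pos h]
        have : pvRun m c ++ [i] = pvRun m (c + 1) := by
          rw [pvRun_succ]; congr 1; simp [h]; push_cast; ring
        rw [this]; exact ih (c + 1)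
      · simp only [if_neg h]; exact ih c

theorem pvWhileA_run (m : Int) (arr : List Int) :
    ∀ fuel c, pvWhileA fuel arr (pvRun m c) = pvRun m (pvAcnt m arr fuel c) := by
  intro fuel
  induction fuel with
  | zero => intro c; simp [pvWhileA, pvAcnt]
  | succ f ih =>
      intro c
      simp only [pvWhileA, pvAcnt, pvMax_run, Option.getD_some]
      by_cases h : m + c + 1 ∈ arr
      · simp only [if_pos h]; rw [pvPass_run m arr c]; exact ih _
      · simp [if_neg h]

theorem pvExtendB_run (m : Int) (arr : List Int) :
    ∀ fuel c, pvExtendB fuel (PySem.Set.ofList arr) (pvRun m c) = pvRun m (pvBcnt m arr fuel c) := by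
  intro fuel
  induction fuel with
  | zero => intro c; simp [pvExtendB, pvBcnt]
  | succ f ih =>
      intro c
      simp only [pvExtendB, pvBcnt, pvLast_run, Option.getD_some]
      have hc : PySem.Set.contains (PySem.Set.ofList arr) (m + c + 1) = decide (m + c + 1 ∈ arr) := by
        simp [PySem.Set.contains, List.contains_eq_mem, PySem.Set.mem_ofList]
      rw [hc]
      by_cases h : m + c + 1 ∈ arr
      · simp only [h, decide_true, if_pos]
        have : pvRun m c ++ [m + c + 1] = pvRun m (c + 1) := by
          rw [pvRun_succ]; congr 1; push_cast; ring
        rw [this]; exact ih _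
      · simp [h]

theorem pvCnt_le (m : Int) : ∀ (l : List Int) (c : Nat), c ≤ pvCnt m l c := by
  intro l
  induction l with
  | nil => intro c; simp [pvCnt]
  | cons i t ih =>
      intro c
      simp only [pvCnt]
      by_cases h : i = m + c + 1
      · simp only [if_pos h]; exact le_trans (by omega) (ih (c + 1))
      · simp only [if_neg h]; exact ih c

theorem pvCnt_mem (m : Int) : ∀ (l : List Int) (c j : Nat), c < j → j ≤ pvCnt m l c → m + (j : Int) ∈ l := by
  intro l
  induction l with
  | nil => intro c j h1 h2; simp [pvCnt] at h2; omega
  | cons i t ih =>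
      intro c j h1 h2
      simp only [pvCnt] at h2
      by_cases h : i = m + c + 1
      · simp only [if_pos h] at h2
        by_cases hj : j = c + 1
        · subst hj
          refine List.mem_cons.2 (Or.inl ?_)
          rw [h]; push_cast; ring
        · exact List.mem_cons.2 (Or.inr (ih (c + 1) j (by omega) h2))
      · simp only [if_neg h] at h2
        exact List.mem_cons.2 (Or.inr (ih c j h1 h2))

theorem pvCnt_progress (m : Int) : ∀ (l : List Int) (c : Nat), (m + c + 1) ∈ l → c < pvCnt m l c := by
  intro l
  induction l with
  | nil => intro c h; simp at h
  | cons i t ih =>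
      intro c h
      simp only [pvCnt]
      by_cases hi : i = m + c + 1
      · simp only [if_pos hi]; exact lt_of_lt_of_le (by omega) (pvCnt_le m t (c + 1))
      · simp only [if_neg hi]
        rcases List.mem_cons.1 h with h' | h'
        · exact absurd h'.symm hi
        · exact ih c h'

theorem pvInv_bound (arr : List Int) (m : Int) (c : Nat) (h : pvInv arr m c) : c < arr.length := by
  have hnodup : (pvRun m c).Nodup := by
    have hrw : pvRun m c = (List.range (c + 1)).map (fun (j : Nat) => m + (j : Int)) := rfl
    rw [hrw]
    refine List.Nodup.map (f := fun j : Nat => m + (j : Int)) ?_ List.nodup_range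
    intro a b hab
    simp only at hab
    omega
  have hsub : pvRun m c ⊆ arr := by
    intro x hx
    rcases (pvMem_run m c x).1 hx with ⟨h1, h2⟩
    have := h (x - m).toNat (by omega)
    have hx' : m + ((x - m).toNat : Int) = x := by omega
    rwa [hx'] at this
  have hlen : (pvRun m c).length = c + 1 := by simp [pvRun]
  have hcard : (pvRun m c).toFinset.card = c + 1 := by
    rw [List.toFinset_card_of_nodup hnodup, hlen]
  have : (pvRun m c).toFinset ⊆ arr.toFinset := by
    intro x hx; rw [List.mem_toFinset] at *; exact hsub hx
  have := Finset.card_le_card this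
  have := arr.toFinset_card_le
  omega

theorem pvCnt_inv (arr : List Int) (m : Int) (c : Nat) (h : pvInv arr m c) :
    pvInv arr m (pvCnt m arr c) := by
  intro j hj
  by_cases hjc : j ≤ c
  · exact h j hjc
  · exact pvCnt_mem m arr c j (by omega) hj

theorem pvInv_step (arr : List Int) (m : Int) (c : Nat) (h : pvInv arr m c)
    (hm : m + c + 1 ∈ arr) : pvInv arr m (c + 1) := by
  intro j hj
  by_cases hjc : j ≤ c
  · exact h j hjc
  · have : j = c + 1 := by omega
    subst this
    have : m + ((c + 1 : Nat) : Int) = m + c + 1 := by push_cast; ring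
    rwa [this]

theorem pvAcnt_exact (m : Int) (arr : List Int) :
    ∀ fuel c, pvInv arr m c → arr.length ≤ fuel + c →
      pvInv arr m (pvAcnt m arr fuel c) ∧ m + (pvAcnt m arr fuel c) + 1 ∉ arr := by
  intro fuel
  induction fuel with
  | zero =>
      intro c hinv hlen
      simp only [pvAcnt]
      refine ⟨hinv, fun hmem => ?_⟩
      have := pvInv_bound arr m (c + 1) (pvInv_step arr m c hinv hmem)
      omega
  | succ f ih =>
      intro c hinv hlen
      simp only [pvAcnt]
      by_cases h : m + c + 1 ∈ arr
      · simp only [if_pos h]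
        have hprog := pvCnt_progress m arr c h
        exact ih (pvCnt m arr c) (pvCnt_inv arr m c hinv) (by omega)
      · simp only [if_neg h]; exact ⟨hinv, h⟩

theorem pvBcnt_exact (m : Int) (arr : List Int) :
    ∀ fuel c, pvInv arr m c → arr.length ≤ fuel + c →
      pvInv arr m (pvBcnt m arr fuel c) ∧ m + (pvBcnt m arr fuel c) + 1 ∉ arr := by
  intro fuel
  induction fuel with
  | zero =>
      intro c hinv hlen
      simp only [pvBcnt]
      refine ⟨hinv, fun hmem => ?_⟩
      have := pvInv_bound arr m (c + 1) (pvInv_step arr m c hinv hmem)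
      omega
  | succ f ih =>
      intro c hinv hlen
      simp only [pvBcnt]
      by_cases h : m + c + 1 ∈ arr
      · simp only [if_pos h]
        exact ih (c + 1) (pvInv_step arr m c hinv h) (by omega)
      · simp only [if_neg h]; exact ⟨hinv, h⟩

theorem pvUnique (arr : List Int) (m : Int) (c c' : Nat)
    (h1 : pvInv arr m c) (h2 : m + c + 1 ∉ arr)
    (h1' : pvInv arr m c') (h2' : m + c' + 1 ∉ arr) : c = c' := by
  rcases lt_trichotomy c c' with h | h | h
  · exfalso
    have := h1' (c + 1) (by omega)
    have hcast : m + ((c + 1 : Nat) : Int) = m + c + 1 := by push_cast; ring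
    rw [hcast] at this
    exact h2 this
  · exact h
  · exfalso
    have := h1 (c' + 1) (by omega)
    have hcast : m + ((c' + 1 : Nat) : Int) = m + c' + 1 := by push_cast; ring
    rw [hcast] at this
    exact h2' this

-- ===== VERDICT (by name: the statement is the Claim_ definition above) =====
theorem find_longest_sequence_spec : Claim_equal_find_longest_sequence := by
  intro arr _ hpre
  unfold Spec_find_longest_sequence find_longest_sequence find_longest_sequence_alt
  rcases hmin : PySem.List.min? arr (fun x => x) with _ | m
  · exact absurd ((PySem.List.min?_eq_none_iff arr _).1 hmin) hpre
  · have hm : m ∈ arr := PySem.List.min?_mem hmin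
    have hinv : pvInv arr m 0 := by
      intro j hj
      have : j = 0 := by omega
      subst this; simpa using hm
    have hrun0 : ([m] : List Int) = pvRun m 0 := (pvRun_zero m).symm
    show pvWhileA arr.length arr [m] = pvExtendB arr.length (PySem.Set.ofList arr) [m]
    rw [hrun0, pvWhileA_run, pvExtendB_run]
    have hA := pvAcnt_exact m arr arr.length 0 hinv (by omega)
    have hB := pvBcnt_exact m arr arr.length 0 hinv (by omega)
    rw [pvUnique arr m _ _ hA.1 hA.2 hB.1 hB.2]
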